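-- pv_equiv track=rewrite | github.com/Clivendemo/cbeplanner | backend/server.py | generate_inquiry_questions
-- ===== SOURCE A (Python) =====
-- def generate_inquiry_questions(strand: str, substrand: str, slo: str) -> str:
--     """Generate relevant key inquiry questions based on the topic"""
--     questions = []
--
--     # Generic patterns based on topic
--     if "evolution" in substrand.lower() or "history" in substrand.lower():
--         questions.append(f"How has {substrand} developed over time?")
--         questions.append(f"What are the key milestones in the development of {substrand}?")
--     elif "architecture" in substrand.lower() or "structure" in substrand.lower():
--         questions.append(f"What are the main components of {substrand}?")
--         questions.append(f"How do the different parts of {substrand} work together?")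
--     elif "network" in substrand.lower() or "communication" in substrand.lower():
--         questions.append(f"How is data transmitted in {substrand}?")
--         questions.append(f"What factors affect {substrand} performance?")
--     elif "programming" in substrand.lower() or "code" in substrand.lower():
--         questions.append(f"How do we implement {substrand} in programming?")
--         questions.append(f"What are the best practices for {substrand}?")
--     else:
--         questions.append(f"What is the importance of {substrand}?")
--         questions.append(f"How do we apply {substrand} in real-world situations?")
--
--     return " ".join([f"{i+1}. {q}" for i, q in enumerate(questions)])
-- ===== SOURCE B (Python) =====
-- TEMPLATES = [
--     "1. How has {s} developed over time? 2. What are the key milestones in the development of {s}?",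
--     "1. What are the main components of {s}? 2. How do the different parts of {s} work together?",
--     "1. How is data transmitted in {s}? 2. What factors affect {s} performance?",
--     "1. How do we implement {s} in programming? 2. What are the best practices for {s}?",
--     "1. What is the importance of {s}? 2. How do we apply {s} in real-world situations?",
-- ]
--
-- KEYWORDS = [("evolution", 0), ("history", 0), ("architecture", 1), ("structure", 1),
--             ("network", 2), ("communication", 2), ("programming", 3), ("code", 3)]
--
--
-- def generate_inquiry_questions(strand: str, substrand: str, slo: str) -> str:
--     low = substrand.lower()
--     idx = min((r for k, r in KEYWORDS if k in low), default=4)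
--     return TEMPLATES[idx].replace("{s}", substrand)
-- ===== Notes on version B (the rewrite author's own statement) =====
-- stated objective: alternative
-- what changed: Replaced the if/elif chain that builds and renders a questions list by a flat keyword->rule-index table whose minimal matching index selects one of five complete pre-rendered templates, instantiated by a single str.replace pass instead of f-strings plus enumerate/join.
import Mathlib
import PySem

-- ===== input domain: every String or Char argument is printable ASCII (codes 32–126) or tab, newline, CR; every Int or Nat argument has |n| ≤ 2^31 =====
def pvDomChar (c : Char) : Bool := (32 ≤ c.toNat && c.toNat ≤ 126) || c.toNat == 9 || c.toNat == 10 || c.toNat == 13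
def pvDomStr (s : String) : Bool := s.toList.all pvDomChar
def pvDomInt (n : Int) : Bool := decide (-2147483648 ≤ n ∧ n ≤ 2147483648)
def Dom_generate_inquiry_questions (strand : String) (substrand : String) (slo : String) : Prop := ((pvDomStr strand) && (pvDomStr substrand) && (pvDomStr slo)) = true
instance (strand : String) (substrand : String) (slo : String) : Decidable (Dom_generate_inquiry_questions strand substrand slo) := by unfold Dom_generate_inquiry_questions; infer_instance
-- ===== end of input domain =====

-- B replaces A's elif chain by a keyword→rule-index table whose minimal matching index picks one of five full pre-rendered templates, instantiated by one str.replace pass; objective: alternative, same cost.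


-- ===== PORT A =====
def generate_inquiry_questions (strand : String) (substrand : String) (slo : String) : String :=
  let low := PySem.Str.lower substrand
  let questions : List String :=
    if PySem.Str.isIn "evolution" low || PySem.Str.isIn "history" low then
      ["How has " ++ substrand ++ " developed over time?",
       "What are the key milestones in the development of " ++ substrand ++ "?"]
    else if PySem.Str.isIn "architecture" low || PySem.Str.isIn "structure" low then
      ["What are the main components of " ++ substrand ++ "?",
       "How do the different parts of " ++ substrand ++ " work together?"]
    else if PySem.Str.isIn "network" low || PySem.Str.isIn "communication" low then
      ["How is data transmitted in " ++ substrand ++ "?",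
       "What factors affect " ++ substrand ++ " performance?"]
    else if PySem.Str.isIn "programming" low || PySem.Str.isIn "code" low then
      ["How do we implement " ++ substrand ++ " in programming?",
       "What are the best practices for " ++ substrand ++ "?"]
    else
      ["What is the importance of " ++ substrand ++ "?",
       "How do we apply " ++ substrand ++ " in real-world situations?"]
  PySem.Str.join " " ((PySem.List.enumerate questions).map
    (fun p => PySem.Int.toStr (p.1 + 1) ++ ". " ++ p.2))

-- ===== PORT B =====
def pvTemplates : List String :=
  [ "1. How has {s} developed over time? 2. What are the key milestones in the development of {s}?",
    "1. What are the main components of {s}? 2. How do the different parts of {s} work together?",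
    "1. How is data transmitted in {s}? 2. What factors affect {s} performance?",
    "1. How do we implement {s} in programming? 2. What are the best practices for {s}?",
    "1. What is the importance of {s}? 2. How do we apply {s} in real-world situations?" ]

def pvKeywords : List (String × Nat) :=
  [("evolution", 0), ("history", 0), ("architecture", 1), ("structure", 1),
   ("network", 2), ("communication", 2), ("programming", 3), ("code", 3)]

def generate_inquiry_questions_alt (strand : String) (substrand : String) (slo : String) : String :=
  let low := PySem.Str.lower substrand
  -- idx = min((r for k, r in KEYWORDS if k in low), default=4)
  let idx := (PySem.List.min? ((pvKeywords.filter (fun p => PySem.Str.isIn p.1 low)).map (·.2)) (fun x => x)).getD 4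
  -- TEMPLATES[idx].replace("{s}", substrand)  (idx is always in range)
  PySem.Str.replace (pvTemplates.getD idx "") "{s}" substrand

-- ===== PRECONDITION & SPEC =====
def Spec_generate_inquiry_questions (strand : String) (substrand : String) (slo : String) (out : String) : Prop := out = generate_inquiry_questions_alt strand substrand slo
instance (strand : String) (substrand : String) (slo : String) (out : String) : Decidable (Spec_generate_inquiry_questions strand substrand slo out) := by unfold Spec_generate_inquiry_questions; infer_instance

-- ===== CLAIM =====
def Claim_equal_generate_inquiry_questions : Prop := ∀ (strand : String) (substrand : String) (slo : String), Dom_generate_inquiry_questions strand substrand slo → Spec_generate_inquiry_questions strand substrand slo (generate_inquiry_questions strand substrand slo)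

-- ===== LEMMAS AND PROOFS =====
theorem pv_render_two (q1 q2 : String) :
    PySem.Str.join " " ((PySem.List.enumerate [q1, q2]).map
      (fun p => PySem.Int.toStr (p.1 + 1) ++ ". " ++ p.2)) = "1. " ++ q1 ++ " 2. " ++ q2 := by
  apply String.toList_inj.mp
  simp [PySem.Str.join, PySem.Chars.join, List.intercalate, PySem.List.enumerate,
        PySem.Int.toStr, PySem.Int.toChars, Nat.toDigits, Nat.toDigitsCore, Nat.digitChar]

theorem pv_idx (low : String) :
    (PySem.List.min? ((pvKeywords.filter (fun p => PySem.Str.isIn p.1 low)).map (·.2)) (fun x => x)).getD 4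
    = if PySem.Str.isIn "evolution" low || PySem.Str.isIn "history" low then 0
      else if PySem.Str.isIn "architecture" low || PySem.Str.isIn "structure" low then 1
      else if PySem.Str.isIn "network" low || PySem.Str.isIn "communication" low then 2
      else if PySem.Str.isIn "programming" low || PySem.Str.isIn "code" low then 3
      else 4 := by
  unfold pvKeywords
  cases h1 : PySem.Str.isIn "evolution" low <;>
  cases h2 : PySem.Str.isIn "history" low <;>
  cases h3 : PySem.Str.isIn "architecture" low <;>
  cases h4 : PySem.Str.isIn "structure" low <;>
  cases h5 : PySem.Str.isIn "network" low <;>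
  cases h6 : PySem.Str.isIn "communication" low <;>
  cases h7 : PySem.Str.isIn "programming" low <;>
  cases h8 : PySem.Str.isIn "code" low <;>
    simp_all [PySem.List.min?]

theorem pv_repl0 (s : String) :
    PySem.Str.replace "1. How has {s} developed over time? 2. What are the key milestones in the development of {s}?" "{s}" s = "1. " ++ ("How has " ++ s ++ " developed over time?") ++ " 2. " ++ ("What are the key milestones in the development of " ++ s ++ "?") := by
  apply String.toList_inj.mp
  simp [PySem.Str.replace, PySem.Chars.replace, PySem.Chars.replace.go]

theorem pv_repl1 (s : String) :
    PySem.Str.replace "1. What are the main components of {s}? 2. How do the different parts of {s} work together?" "{s}" s = "1. " ++ ("What are the main components of " ++ s ++ "?") ++ " 2. " ++ ("How do the different parts of " ++ s ++ " work together?") := by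
  apply String.toList_inj.mp
  simp [PySem.Str.replace, PySem.Chars.replace, PySem.Chars.replace.go]

theorem pv_repl2 (s : String) :
    PySem.Str.replace "1. How is data transmitted in {s}? 2. What factors affect {s} performance?" "{s}" s = "1. " ++ ("How is data transmitted in " ++ s ++ "?") ++ " 2. " ++ ("What factors affect " ++ s ++ " performance?") := by
  apply String.toList_inj.mp
  simp [PySem.Str.replace, PySem.Chars.replace, PySem.Chars.replace.go]

theorem pv_repl3 (s : String) :
    PySem.Str.replace "1. How do we implement {s} in programming? 2. What are the best practices for {s}?" "{s}" s = "1. " ++ ("How do we implement " ++ s ++ " in programming?") ++ " 2. " ++ ("What are the best practices for " ++ s ++ "?") := by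
  apply String.toList_inj.mp
  simp [PySem.Str.replace, PySem.Chars.replace, PySem.Chars.replace.go]

theorem pv_repl4 (s : String) :
    PySem.Str.replace "1. What is the importance of {s}? 2. How do we apply {s} in real-world situations?" "{s}" s = "1. " ++ ("What is the importance of " ++ s ++ "?") ++ " 2. " ++ ("How do we apply " ++ s ++ " in real-world situations?") := by
  apply String.toList_inj.mp
  simp [PySem.Str.replace, PySem.Chars.replace, PySem.Chars.replace.go]

-- ===== VERDICT =====
theorem generate_inquiry_questions_spec : Claim_equal_generate_inquiry_questions := by
  intro strand substrand slo _
  unfold Spec_generate_inquiry_questions generate_inquiry_questions generate_inquiry_questions_alt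
  simp only [pv_idx]
  split_ifs with c1 c2 c3 c4 <;>
    simp only [pvTemplates, List.getD, List.getElem?_cons_zero, List.getElem?_cons_succ,
               Option.getD_some, pv_render_two, pv_repl0, pv_repl1, pv_repl2, pv_repl3, pv_repl4]
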